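-- pv_equiv track=rewrite | github.com/hirosuzuki/procon | atcoder/agc021/a.py | solve
-- ===== SOURCE A (Python) =====
-- def solve(N):
--     if N < 10:
--         return N
--     x = N % 10
--     if x == 9:
--         return solve(N // 10) + x
--     else:
--         return solve(N // 10 - 1) + 9
-- ===== SOURCE B (Python) =====
-- def solve(N):
--     if N < 10:
--         return N
--     ds = 0
--     L = 0
--     n = N
--     while n >= 10:
--         ds += n % 10
--         n //= 10
--         L += 1
--     ds += n
--     return max(ds, 9 * L + n - 1)
-- ===== Notes on version B (the rewrite author's own statement) =====
-- stated objective: simpler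
-- what changed: Replaces A's branching recursion (which recurses on N//10 or N//10-1 depending on the last digit) with a single digit-scan loop that computes N's digit sum, digit count and leading digit, then returns the larger of the digit sum and the closed-form candidate whose leading digit is decremented and all remaining digits are nines.
import Mathlib
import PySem

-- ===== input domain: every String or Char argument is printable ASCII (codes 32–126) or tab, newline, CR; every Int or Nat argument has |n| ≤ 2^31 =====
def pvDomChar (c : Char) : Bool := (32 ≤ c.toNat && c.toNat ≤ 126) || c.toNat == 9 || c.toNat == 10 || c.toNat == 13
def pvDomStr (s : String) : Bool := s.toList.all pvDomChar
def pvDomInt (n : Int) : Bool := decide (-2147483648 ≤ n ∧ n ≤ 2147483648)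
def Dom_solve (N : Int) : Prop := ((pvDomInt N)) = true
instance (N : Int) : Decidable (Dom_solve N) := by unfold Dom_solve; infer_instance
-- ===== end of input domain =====

-- B replaces A's branching recursion by one digit-scan loop plus a closed-form max; objective: simpler.

-- ===== PORT A =====
def solve (N : Int) : Int :=
  if N < 10 then N
  else
    let x := PySem.Int.mod N 10
    if x = 9 then solve (PySem.Int.floordiv N 10) + x
    else solve (PySem.Int.floordiv N 10 - 1) + 9
termination_by N.toNat
decreasing_by
  · rw [PySem.Int.floordiv_eq_ediv_of_pos (by norm_num)]; omega
  · rw [PySem.Int.floordiv_eq_ediv_of_pos (by norm_num)]; omega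

-- ===== PORT B =====
-- transliteration of Source B's while-loop: state (ds, L, n)
def solveAltLoop (ds L n : Int) : Int × Int × Int :=
  if 10 ≤ n then
    solveAltLoop (ds + PySem.Int.mod n 10) (L + 1) (PySem.Int.floordiv n 10)
  else (ds, L, n)
termination_by n.toNat
decreasing_by
  rw [PySem.Int.floordiv_eq_ediv_of_pos (by norm_num)]; omega

def solve_alt (N : Int) : Int :=
  if N < 10 then N
  else
    let r := solveAltLoop 0 0 N
    max (r.1 + r.2.2) (9 * r.2.1 + r.2.2 - 1)

-- ===== PRECONDITION & SPEC =====
def Spec_solve (N : Int) (out : Int) : Prop := out = solve_alt N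
instance (N : Int) (out : Int) : Decidable (Spec_solve N out) := by unfold Spec_solve; infer_instance

-- ===== CLAIM (what is proved, stated in full; the proofs are below) =====
def Claim_equal_solve : Prop := ∀ (N : Int), Dom_solve N → Spec_solve N (solve N)

-- ===== LEMMAS AND PROOFS =====

theorem fd10 (n : Int) : PySem.Int.floordiv n 10 = n / 10 :=
  PySem.Int.floordiv_eq_ediv_of_pos (by norm_num)

theorem md10 (n : Int) : PySem.Int.mod n 10 = n % 10 :=
  PySem.Int.mod_eq_emod_of_pos (by norm_num)

-- proof-side views of B's loop: sum of scanned digits, number of scanned digits, leftover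
def DS (n : Int) : Int := if 10 ≤ n then DS (n / 10) + n % 10 else 0
termination_by n.toNat
decreasing_by omega

def Len (n : Int) : Int := if 10 ≤ n then Len (n / 10) + 1 else 0
termination_by n.toNat
decreasing_by omega

def Fst (n : Int) : Int := if 10 ≤ n then Fst (n / 10) else n
termination_by n.toNat
decreasing_by omega

theorem solve_ge (N : Int) (h : 10 ≤ N) :
    solve N = if N % 10 = 9 then solve (N / 10) + N % 10 else solve (N / 10 - 1) + 9 := by
  rw [solve]
  simp only [if_neg (not_lt.mpr h), fd10, md10]

theorem solve_lt (N : Int) (h : N < 10) : solve N = N := by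
  rw [solve]; rw [if_pos h]

theorem loop_eq : ∀ (k : Nat) (n : Int), n.toNat ≤ k → ∀ ds L,
    solveAltLoop ds L n = (ds + DS n, L + Len n, Fst n) := by
  intro k
  induction k with
  | zero =>
    intro n hk ds L
    rw [solveAltLoop, DS, Len, Fst]
    simp [show ¬ (10 ≤ n) from by omega]
  | succ k ih =>
    intro n hk ds L
    by_cases h : 10 ≤ n
    · rw [solveAltLoop, DS, Len, Fst]
      simp only [if_pos h, md10, fd10]
      rw [ih (n / 10) (by omega)]
      refine Prod.ext ?_ (Prod.ext ?_ ?_) <;> simp <;> ring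
    · rw [solveAltLoop, DS, Len, Fst]
      simp [if_neg h]

theorem DS_bounds : ∀ (k : Nat) (n : Int), n.toNat ≤ k → 0 ≤ DS n ∧ DS n ≤ 9 * Len n := by
  intro k
  induction k with
  | zero =>
    intro n hk
    rw [DS, Len]
    simp [show ¬ (10 ≤ n) from by omega]
  | succ k ih =>
    intro n hk
    by_cases h : 10 ≤ n
    · rw [DS, Len]
      simp only [if_pos h]
      have := ih (n / 10) (by omega)
      omega
    · rw [DS, Len]
      simp [if_neg h]

-- A's "else" branch in closed form: for 1 ≤ M, solve (M-1) = 9 * Len M + Fst M - 1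
theorem solve_pred : ∀ (k : Nat) (M : Int), M.toNat ≤ k → 1 ≤ M →
    solve (M - 1) = 9 * Len M + Fst M - 1 := by
  intro k
  induction k with
  | zero => intro M hk h1; exfalso; omega
  | succ k ih =>
    intro M hk h1
    by_cases h10 : M - 1 < 10
    · rw [solve_lt _ h10]
      by_cases hM : M < 10
      · rw [Len, Fst]
        simp [show ¬ (10 ≤ M) from by omega]
      · have hM10 : M = 10 := by omega
        subst hM10
        rw [Len, Fst]
        norm_num
        rw [Len, Fst]
        norm_num
    · rw [solve_ge (M - 1) (by omega)]
      have hrec : Len M = Len (M / 10) + 1 ∧ Fst M = Fst (M / 10) := by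
        rw [Len, Fst]; simp [show (10:Int) ≤ M from by omega]
      have ihh := ih (M / 10) (by omega) (by omega)
      by_cases hx : M % 10 = 0
      · rw [if_pos (by omega : (M - 1) % 10 = 9)]
        have : (M - 1) / 10 = M / 10 - 1 := by omega
        rw [this]
        omega
      · rw [if_neg (by omega : ¬ (M - 1) % 10 = 9)]
        have : (M - 1) / 10 = M / 10 := by omega
        rw [this]
        omega

theorem alt_ge (N : Int) (h : 10 ≤ N) :
    solve_alt N = max (DS N + Fst N) (9 * Len N + Fst N - 1) := by
  rw [solve_alt]
  rw [if_neg (not_lt.mpr h)]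
  rw [loop_eq N.toNat N le_rfl]
  norm_num

theorem main_aux : ∀ (k : Nat) (N : Int), N.toNat ≤ k → solve N = solve_alt N := by
  intro k
  induction k with
  | zero =>
    intro N hk
    have h : N < 10 := by omega
    rw [solve_lt _ h, solve_alt, if_pos h]
  | succ k ih =>
    intro N hk
    by_cases h : N < 10
    · rw [solve_lt _ h, solve_alt, if_pos h]
    · rw [alt_ge N (by omega), solve_ge N (by omega)]
      have hrec : Len N = Len (N / 10) + 1 ∧ Fst N = Fst (N / 10) ∧ DS N = DS (N / 10) + N % 10 := by
        rw [Len, Fst, DS]; simp [show (10:Int) ≤ N from by omega]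
      by_cases hx : N % 10 = 9
      · rw [if_pos hx]
        by_cases hq : N / 10 < 10
        · rw [solve_lt _ hq]
          have hL : Len (N / 10) = 0 ∧ Fst (N / 10) = N / 10 ∧ DS (N / 10) = 0 := by
            rw [Len, Fst, DS]; simp [show ¬ ((10:Int) ≤ N / 10) from by omega]
          rw [Int.max_def]; split_ifs <;> omega
        · rw [ih (N / 10) (by omega), alt_ge (N / 10) (by omega)]
          rw [Int.max_def, Int.max_def]; split_ifs <;> omega
      · rw [if_neg hx]
        rw [solve_pred N.toNat (N / 10) (by omega) (by omega)]
        have hb := DS_bounds N.toNat (N / 10) (by omega)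
        rw [Int.max_def]; split_ifs <;> omega

-- ===== VERDICT (by name: the statement is the Claim_ definition above) =====
theorem solve_spec : Claim_equal_solve := by
  intro N _
  unfold Spec_solve
  exact main_aux N.toNat N le_rfl
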